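-- pv_equiv track=rewrite | github.com/AbdallahHikal/Cryptography | fun.py | keyboard_offset_E
-- ===== SOURCE A (Python) =====
-- def keyboard_offset_E(text):
--     keyboard = 'QWERTYUIOPASDFGHJKLZXCVBNM'
--     offset = 1
--     result = ''
--     for char in text.upper():
--         if char in keyboard:
--             i = keyboard.index(char)
--             result += keyboard[(i + offset) % len(keyboard)]
--         else:
--             result += char
--     return result
-- ===== SOURCE B (Python) =====
-- def keyboard_offset_E(text):
--     rows = ('QWERTYUIOP', 'ASDFGHJKL', 'ZXCVBNM')
--
--     def shift(c):
--         for r in range(3):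
--             j = rows[r].find(c)
--             if j != -1:
--                 if j + 1 < len(rows[r]):
--                     return rows[r][j + 1]
--                 return rows[(r + 1) % 3][0]
--         return c
--
--     return ''.join(map(shift, text.upper()))
-- ===== Notes on version B (the rewrite author's own statement) =====
-- stated objective: alternative
-- what changed: B drops A's flat 26-char cycle with membership test, .index scan and (i+1)%26: it keeps the three keyboard rows separately, takes the successor within a row and wraps a row's last key to the first key of the next row, and builds the result by joining a mapped character sequence instead of += concatenation.
import Mathlib
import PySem

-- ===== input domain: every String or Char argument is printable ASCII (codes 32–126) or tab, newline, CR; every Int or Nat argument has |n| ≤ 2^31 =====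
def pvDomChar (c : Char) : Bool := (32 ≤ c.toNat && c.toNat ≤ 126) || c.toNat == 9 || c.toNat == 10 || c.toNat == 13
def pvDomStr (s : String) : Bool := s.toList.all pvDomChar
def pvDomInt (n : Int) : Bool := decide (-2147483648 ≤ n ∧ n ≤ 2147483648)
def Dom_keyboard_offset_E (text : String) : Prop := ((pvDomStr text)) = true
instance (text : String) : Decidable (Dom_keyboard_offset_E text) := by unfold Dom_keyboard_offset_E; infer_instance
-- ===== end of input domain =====

-- B replaces A's flat 26-char cycle (membership test, .index, (i+1)%26, += building) by the
-- three keyboard rows with successor-in-row and wrap-to-next-row, joined by a single map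
-- (return value only; neither function mutates its input).

-- ===== PORT A =====
-- the keyboard layout string, as a char list
def pvKbA : List Char :=
  ['Q','W','E','R','T','Y','U','I','O','P','A','S','D','F','G','H','J','K','L','Z','X','C','V','B','N','M']

-- loop body: 'char in keyboard' is PySem.Chars.isIn; 'keyboard.index(char)' is
-- PySem.Chars.find (guarded by the membership test, so .index never raises); the
-- default of pyGetD is never used ((i+1) % 26 is always in range).
def keyboard_offset_E (text : String) : String :=
  let offset : Int := 1
  String.ofList ((PySem.Str.upper text).toList.foldl
    (fun result char =>
      if PySem.Chars.isIn [char] pvKbA then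
        result ++ [PySem.List.pyGetD pvKbA
          (PySem.Int.mod (PySem.Chars.find pvKbA [char] + offset) (PySem.List.len pvKbA)) char]
      else
        result ++ [char]) [])

-- ===== PORT B =====
-- the three keyboard rows of Source B
def pvRows : List (List Char) :=
  [['Q','W','E','R','T','Y','U','I','O','P'],
   ['A','S','D','F','G','H','J','K','L'],
   ['Z','X','C','V','B','N','M']]

-- 'for r in range(3): … return …' with early return, as recursion over the remaining indices;
-- rows[r].find(c) is PySem.Chars.find, rows[(r+1)%3][0] uses PySem.Int.mod (defaults of pyGetD unreachable)
def pvShiftGo (c : Char) : List Int → Char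
  | [] => c
  | r :: rest =>
    let row := PySem.List.pyGetD pvRows r []
    let j := PySem.Chars.find row [c]
    if j ≠ -1 then
      if j + 1 < PySem.List.len row then PySem.List.pyGetD row (j + 1) c
      else PySem.List.pyGetD (PySem.List.pyGetD pvRows (PySem.Int.mod (r + 1) 3) []) 0 c
    else pvShiftGo c rest

-- join of map(shift, text.upper())
def keyboard_offset_E_alt (text : String) : String :=
  String.ofList ((PySem.Str.upper text).toList.map
    (fun c => pvShiftGo c (PySem.List.pyRange 0 3 1)))

-- ===== PRECONDITION & SPEC =====
def Spec_keyboard_offset_E (text : String) (out : String) : Prop := out = keyboard_offset_E_alt text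
instance (text : String) (out : String) : Decidable (Spec_keyboard_offset_E text out) := by unfold Spec_keyboard_offset_E; infer_instance

-- ===== CLAIM (what is proved, stated in full; the proofs are below) =====
def Claim_equal_keyboard_offset_E : Prop := ∀ (text : String), Dom_keyboard_offset_E text → Spec_keyboard_offset_E text (keyboard_offset_E text)

-- ===== LEMMAS AND PROOFS =====

-- A's per-character value
def pvStepA (c : Char) : Char :=
  if PySem.Chars.isIn [c] pvKbA then
    PySem.List.pyGetD pvKbA (PySem.Int.mod (PySem.Chars.find pvKbA [c] + 1) (PySem.List.len pvKbA)) c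
  else c

-- per character, A's flat-cycle shift equals B's row-wise successor
theorem pvStep_eq (c : Char) :
    pvStepA c = pvShiftGo c (PySem.List.pyRange 0 3 1) := by
  by_cases h : c ∈ pvKbA
  · simp only [pvKbA, List.mem_cons, List.not_mem_nil, or_false] at h
    rcases h with h|h|h|h|h|h|h|h|h|h|h|h|h|h|h|h|h|h|h|h|h|h|h|h|h|h <;> subst h <;> decide
  · have hsplit : pvKbA =
        (PySem.List.pyGetD pvRows 0 []) ++ (PySem.List.pyGetD pvRows 1 []) ++
        (PySem.List.pyGetD pvRows 2 []) := by decide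
    rw [hsplit] at h
    simp only [List.mem_append, not_or] at h
    obtain ⟨⟨h0, h1⟩, h2⟩ := h
    have f0 : PySem.Chars.find (PySem.List.pyGetD pvRows 0 []) [c] = -1 :=
      (PySem.Chars.find_eq_neg_one_iff _ _).mpr
        (fun hi => h0 ((List.singleton_infix_iff c _).mp hi))
    have f1 : PySem.Chars.find (PySem.List.pyGetD pvRows 1 []) [c] = -1 :=
      (PySem.Chars.find_eq_neg_one_iff _ _).mpr
        (fun hi => h1 ((List.singleton_infix_iff c _).mp hi))
    have f2 : PySem.Chars.find (PySem.List.pyGetD pvRows 2 []) [c] = -1 :=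
      (PySem.Chars.find_eq_neg_one_iff _ _).mpr
        (fun hi => h2 ((List.singleton_infix_iff c _).mp hi))
    have hin : PySem.Chars.isIn [c] pvKbA = false :=
      (PySem.Chars.isIn_eq_false_iff [c] pvKbA).mpr
        (fun hi => by
          have := (List.singleton_infix_iff c pvKbA).mp hi
          rw [hsplit] at this
          simp only [List.mem_append] at this
          tauto)
    have hrange : PySem.List.pyRange 0 3 1 = [(0 : Int), 1, 2] := by decide
    rw [hrange]
    simp [pvStepA, pvShiftGo, hin, f0, f1, f2]

-- A's loop body appends one character: the branch-on-membership form is append of pvStepA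
theorem pvBodyA (result : List Char) (char : Char) :
    (if PySem.Chars.isIn [char] pvKbA then
        result ++ [PySem.List.pyGetD pvKbA
          (PySem.Int.mod (PySem.Chars.find pvKbA [char] + 1) (PySem.List.len pvKbA)) char]
      else result ++ [char]) = result ++ [pvStepA char] := by
  unfold pvStepA; split <;> rfl

-- A's fold equals the map of pvStepA
theorem pvFoldA (cs : List Char) (acc : List Char) :
    (cs.foldl
      (fun result char =>
        if PySem.Chars.isIn [char] pvKbA then
          result ++ [PySem.List.pyGetD pvKbA
            (PySem.Int.mod (PySem.Chars.find pvKbA [char] + 1) (PySem.List.len pvKbA)) char]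
        else result ++ [char]) acc) = acc ++ cs.map pvStepA := by
  induction cs generalizing acc with
  | nil => simp
  | cons c cs ih =>
    rw [List.foldl_cons, pvBodyA, ih]
    simp

-- ===== VERDICT (by name: the statement is the Claim_ definition above) =====
theorem keyboard_offset_E_spec : Claim_equal_keyboard_offset_E := by
  intro text _
  unfold Spec_keyboard_offset_E keyboard_offset_E keyboard_offset_E_alt
  simp only [pvFoldA, List.nil_append]
  exact congrArg String.ofList (List.map_congr_left (fun c _ => pvStep_eq c))
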